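-- pv_equiv track=rewrite | github.com/brokenfloppydisk/Ciphers | ciphers/alphabet.py | keyword_text
-- ===== SOURCE A (Python) =====
-- from string import ascii_lowercase
--
-- def keyword_text(keyword: str) -> str:
--     """Generates the alphabet starting with the keyword
--     and continuing in alphabetical order.
--     """
--     # Create an empty keyword to use as the normalized keyword
--     normalized_keyword = ""
--
--     # Iterate through every item in the keyword, as a lowercase letter
--     for i in keyword.lower():
--         # Add unique lowercase letters to the normalized keyword
--         if i not in normalized_keyword and i in ascii_lowercase:
--             normalized_keyword += i
--
--     # Set the keyword to the normalized keyword
--     keyword = normalized_keyword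
--
--     # Create a list of the letters in the alphabet not in the keyword
--     # using a list comprehension
--     text = [i for i in ascii_lowercase if i not in keyword]
--
--     # Add keyword to the start of text using list slicing
--     text[:0] = list(keyword)
--
--     # Concatenate all of the items in the text list to form a string
--     text = "".join(text)
--
--     # Return the final string
--     return text
-- ===== SOURCE B (Python) =====
-- from string import ascii_lowercase
--
-- def keyword_text(keyword: str) -> str:
--     kw = "".join(c for c in keyword.lower() if c in ascii_lowercase)
--     # Rank every alphabet letter: keyword letters by first occurrence, the rest by ord.
--     return "".join(sorted(ascii_lowercase,
--                           key=lambda c: kw.index(c) if c in kw else len(kw) + ord(c)))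
-- ===== Notes on version B (the rewrite author's own statement) =====
-- stated objective: alternative
-- what changed: Instead of A's staged build (grow a deduped keyword string with membership tests, comprehend the remaining letters, slice-prepend), B sorts the 26 alphabet letters by a rank function: first-occurrence index in the filtered keyword, else len(kw)+ord(c).
import Mathlib
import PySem

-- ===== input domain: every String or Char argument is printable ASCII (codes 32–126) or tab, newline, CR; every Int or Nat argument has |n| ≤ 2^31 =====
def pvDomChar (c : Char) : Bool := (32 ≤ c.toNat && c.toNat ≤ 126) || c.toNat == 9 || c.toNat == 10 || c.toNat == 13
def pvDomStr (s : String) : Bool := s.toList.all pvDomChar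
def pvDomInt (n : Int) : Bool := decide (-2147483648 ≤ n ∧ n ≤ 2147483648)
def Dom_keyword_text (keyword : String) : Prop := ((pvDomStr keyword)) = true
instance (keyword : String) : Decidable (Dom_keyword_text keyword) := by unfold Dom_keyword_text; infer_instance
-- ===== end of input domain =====

-- B replaces A's staged build (dedup keyword, remaining letters, slice-prepend) with a
-- sort of the 26 alphabet letters under a rank key (first index in the filtered keyword,
-- else len(kw)+ord): an alternative algorithm of the same cost.


-- string.ascii_lowercase
def pvAbc : List Char := "abcdefghijklmnopqrstuvwxyz".toList

-- ===== PORT A =====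
-- Python's 'i not in normalized_keyword' / 'i in ascii_lowercase' are one-char substring
-- tests, which coincide exactly with character membership (List.contains).
def keyword_text (keyword : String) : String :=
  let normalized := (PySem.Chars.lower keyword.toList).foldl
    (fun acc c => if !acc.contains c && pvAbc.contains c then acc ++ [c] else acc) []
  let text := pvAbc.filter (fun c => !normalized.contains c)
  String.ofList (normalized ++ text)

-- ===== PORT B =====
-- kw.index(c): guarded by 'c in kw', ported as index? with a default never reached.
def pvIdx (l : List Char) (c : Char) : Nat := (PySem.List.index? l c).getD 0

def keyword_text_alt (keyword : String) : String :=
  let kw := (PySem.Chars.lower keyword.toList).filter (fun c => pvAbc.contains c)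
  String.ofList (PySem.List.sorted pvAbc
    (fun c => if kw.contains c then ((pvIdx kw c : Nat) : Int)
              else (kw.length : Int) + c.toNat) false)

-- ===== PRECONDITION & SPEC =====
def Spec_keyword_text (keyword : String) (out : String) : Prop := out = keyword_text_alt keyword
instance (keyword : String) (out : String) : Decidable (Spec_keyword_text keyword out) := by unfold Spec_keyword_text; infer_instance

-- ===== CLAIM (what is proved, stated in full; the proofs are below) =====
def Claim_equal_keyword_text : Prop := ∀ (keyword : String), Dom_keyword_text keyword → Spec_keyword_text keyword (keyword_text keyword)

-- ===== LEMMAS AND PROOFS =====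

theorem pvIdx_append_of_mem (l t : List Char) (c : Char) (h : c ∈ l) :
    pvIdx (l ++ t) c = pvIdx l c := by
  unfold pvIdx; rw [PySem.List.index?_append_of_mem t h]

theorem pvIdx_append_singleton_self (l : List Char) (c : Char) (h : c ∉ l) :
    pvIdx (l ++ [c]) c = l.length := by
  unfold pvIdx; rw [PySem.List.index?_append_singleton_self l c h]; rfl

theorem pvIdx_lt_length (l : List Char) (c : Char) (h : c ∈ l) :
    pvIdx l c < l.length := by
  obtain ⟨k, hk⟩ := Option.isSome_iff_exists.mp ((PySem.List.index?_isSome_iff l c).mpr h)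
  obtain ⟨hlt, -, -⟩ := PySem.List.getElem_of_index?_eq_some hk
  unfold pvIdx; rw [hk]; exact hlt

-- A's single loop with the combined guard equals the Set.add fold over the filtered list.
theorem pv_foldl_guard_eq (xs acc : List Char) :
    xs.foldl (fun acc c => if !acc.contains c && pvAbc.contains c then acc ++ [c] else acc) acc
      = (xs.filter (fun c => pvAbc.contains c)).foldl PySem.Set.add acc := by
  induction xs generalizing acc with
  | nil => rfl
  | cons x xs ih =>
    rw [List.foldl_cons, List.filter_cons]
    by_cases hx : x ∈ pvAbc
    · by_cases ha : x ∈ acc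
      · rw [if_neg (by simp [ha]), if_pos (by simp [hx]), List.foldl_cons,
          show PySem.Set.add acc x = acc from by simp [PySem.Set.add, ha]]
        exact ih acc
      · rw [if_pos (by simp [ha, hx]), if_pos (by simp [hx]), List.foldl_cons,
          show PySem.Set.add acc x = acc ++ [x] from by simp [PySem.Set.add, ha]]
        exact ih (acc ++ [x])
    · rw [if_neg (by simp [hx]), if_neg (by simp [hx])]
      exact ih acc

-- The ordered dedup lists elements in order of strictly increasing first-occurrence index.
theorem pv_ofList_pairwise_idx (xs : List Char) :
    (PySem.Set.ofList xs).Pairwise (fun a b => pvIdx xs a < pvIdx xs b) := by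
  induction xs using List.reverseRecOn with
  | nil => simp [PySem.Set.ofList]
  | append_singleton l x ih =>
    have hof : PySem.Set.ofList (l ++ [x]) = PySem.Set.add (PySem.Set.ofList l) x := by
      simp [PySem.Set.ofList_eq_foldl, List.foldl_append]
    by_cases hx : x ∈ l
    · have : PySem.Set.add (PySem.Set.ofList l) x = PySem.Set.ofList l := by
        simp [PySem.Set.add, PySem.Set.contains, (PySem.Set.mem_ofList l x).mpr hx]
      rw [hof, this]
      exact ih.imp_of_mem (fun ha hb hr => by
        rw [pvIdx_append_of_mem l [x] _ ((PySem.Set.mem_ofList l _).mp ha),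
          pvIdx_append_of_mem l [x] _ ((PySem.Set.mem_ofList l _).mp hb)]
        exact hr)
    · have : PySem.Set.add (PySem.Set.ofList l) x = PySem.Set.ofList l ++ [x] := by
        simp [PySem.Set.add, PySem.Set.contains, (PySem.Set.mem_ofList l x), hx]
      rw [hof, this]
      refine List.pairwise_append.mpr ⟨?_, by simp, ?_⟩
      · exact ih.imp_of_mem (fun ha hb hr => by
          rw [pvIdx_append_of_mem l [x] _ ((PySem.Set.mem_ofList l _).mp ha),
            pvIdx_append_of_mem l [x] _ ((PySem.Set.mem_ofList l _).mp hb)]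
          exact hr)
      · intro a ha b hb
        have ha' : a ∈ l := (PySem.Set.mem_ofList l _).mp ha
        have hb' : b = x := by simpa using hb
        rw [hb', pvIdx_append_of_mem l [x] _ ha', pvIdx_append_singleton_self l x hx]
        exact pvIdx_lt_length l a ha'

theorem pv_abc_nodup : pvAbc.Nodup := by decide

theorem pv_abc_pairwise_toNat : pvAbc.Pairwise (fun a b => a.toNat < b.toNat) := by decide

-- ===== VERDICT (by name: the statement is the Claim_ definition above) =====
theorem keyword_text_spec : Claim_equal_keyword_text := by
  intro keyword _
  unfold Spec_keyword_text keyword_text keyword_text_alt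
  simp only []
  set kw := (PySem.Chars.lower keyword.toList).filter (fun c => pvAbc.contains c) with hkw
  set N := PySem.Set.ofList kw with hN
  set key : Char → Int := fun c =>
    if kw.contains c then ((pvIdx kw c : Nat) : Int) else (kw.length : Int) + c.toNat with hkey
  have hnorm : (PySem.Chars.lower keyword.toList).foldl
      (fun acc c => if !acc.contains c && pvAbc.contains c then acc ++ [c] else acc) [] = N := by
    rw [pv_foldl_guard_eq, hN, PySem.Set.ofList_eq_foldl]
  rw [hnorm]
  -- membership facts
  have hNmem : ∀ {c : Char}, c ∈ N ↔ c ∈ kw := fun {c} => PySem.Set.mem_ofList kw c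
  have hNsub : ∀ c ∈ N, c ∈ pvAbc := by
    intro c hc
    have := hNmem.mp hc
    rw [hkw] at this
    simpa using (List.mem_filter.mp this).2
  -- the sorted list is exactly A's list
  have hsorted : PySem.List.sorted pvAbc key false
      = N ++ pvAbc.filter (fun c => !N.contains c) := by
    apply PySem.List.sorted_eq_of_perm_of_pairwise_lt
    · -- permutation
      have h1 : (pvAbc.filter (fun c => N.contains c)).Perm N := by
        rw [List.perm_ext_iff_of_nodup (pv_abc_nodup.filter _) (PySem.Set.nodup_ofList kw)]
        intro a
        simp only [List.mem_filter, PySem.Set.contains]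
        constructor
        · intro h
          exact List.mem_of_elem_eq_true h.2
        · intro h
          exact ⟨hNsub a h, List.elem_eq_true_of_mem h⟩
      exact (h1.symm.append_right _).trans (List.filter_append_perm _ pvAbc)
    · -- pairwise strictly increasing key
      refine List.pairwise_append.mpr ⟨?_, ?_, ?_⟩
      · exact (pv_ofList_pairwise_idx kw).imp_of_mem (fun {a b} ha hb hr => by
          have ha' := hNmem.mp ha
          have hb' := hNmem.mp hb
          simp only [hkey]
          rw [if_pos (List.elem_eq_true_of_mem ha'), if_pos (List.elem_eq_true_of_mem hb')]
          exact_mod_cast hr)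
      · exact (pv_abc_pairwise_toNat.filter _).imp_of_mem (fun {a b} ha hb hr => by
          have ha' : a ∉ kw := by
            have h2 := (List.mem_filter.mp ha).2
            intro h
            simp [PySem.Set.contains, hNmem.mpr h] at h2
          have hb' : b ∉ kw := by
            have h2 := (List.mem_filter.mp hb).2
            intro h
            simp [PySem.Set.contains, hNmem.mpr h] at h2
          simp only [hkey]
          rw [if_neg (fun h => ha' (List.mem_of_elem_eq_true h)),
            if_neg (fun h => hb' (List.mem_of_elem_eq_true h))]
          omega)
      · intro a ha b hb
        have ha' : a ∈ kw := hNmem.mp ha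
        have hb' : b ∉ kw := by
          have h2 := (List.mem_filter.mp hb).2
          intro h
          simp [PySem.Set.contains, hNmem.mpr h] at h2
        simp only [hkey]
        rw [if_pos (List.elem_eq_true_of_mem ha'), if_neg (fun h => hb' (List.mem_of_elem_eq_true h))]
        have h1 : pvIdx kw a < kw.length := pvIdx_lt_length kw a ha'
        omega
  rw [hsorted]
  rfl
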